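-- pv_equiv track=rewrite | github.com/christopherhojny/supplement_simple-iterative-methods-linopt-convex-sets | auxiliary.py | compute_node_weights
-- ===== SOURCE A (Python) =====
-- def compute_node_weights(nodes, edges):
--     '''
--     Computes node weights of a graph.
--     A node v is assigned the weight degree(v).
--
--     nodes - list of nodes
--     edges - list of edges of the graph
--     '''
--
--     degrees = {}
--     for (u,v) in edges:
--         if u in degrees:
--             degrees[u] += 1
--         else:
--             degrees[u] = 1
--         if v in degrees:
--             degrees[v] += 1
--         else:
--             degrees[v] = 1
--
--     obj = []
--     for v in nodes:
--         if v in degrees: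
--             obj.append(degrees[v])
--         else:
--             obj.append(0)
--
--     return obj
-- ===== SOURCE B (Python) =====
-- def compute_node_weights(nodes, edges):
--     '''
--     Computes node weights of a graph.
--     A node v is assigned the weight degree(v).
--
--     nodes - list of nodes
--     edges - list of edges of the graph
--     '''
--     return [sum((u == v) + (w == v) for (u, w) in edges) for v in nodes]
-- ===== Notes on version B (the rewrite author's own statement) =====
-- stated objective: simpler
-- what changed: Drops the degree dictionary: each node's weight is computed directly as the sum of endpoint matches over all edges (self-loops still count 2), a one-line comprehension instead of a dict-building pass plus a lookup pass.
import Mathlib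
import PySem

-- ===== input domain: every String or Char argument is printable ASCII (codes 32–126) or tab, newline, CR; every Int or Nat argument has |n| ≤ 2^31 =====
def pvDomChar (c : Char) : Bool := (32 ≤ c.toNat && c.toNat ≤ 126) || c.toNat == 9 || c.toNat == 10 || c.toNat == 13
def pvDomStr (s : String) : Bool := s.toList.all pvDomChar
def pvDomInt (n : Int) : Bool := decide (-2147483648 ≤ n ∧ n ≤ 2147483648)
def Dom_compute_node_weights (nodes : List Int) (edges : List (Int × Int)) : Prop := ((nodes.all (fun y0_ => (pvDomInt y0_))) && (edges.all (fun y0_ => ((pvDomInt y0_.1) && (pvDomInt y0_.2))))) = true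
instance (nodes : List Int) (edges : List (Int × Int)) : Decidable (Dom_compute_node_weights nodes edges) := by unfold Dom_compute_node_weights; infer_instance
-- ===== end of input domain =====

-- B replaces A's dict-building pass + lookup pass by a direct per-node scan of the edges (simpler, same results incl. self-loops).

-- ===== PORT A =====
-- literal port of A: build the degree dict over edges, then look each node up
def compute_node_weights (nodes : List Int) (edges : List (Int × Int)) : List Int :=
  let degrees : PySem.Dict Int Int :=
    edges.foldl (fun d e =>
      let d := if d.contains e.1 then d.insert e.1 (d.getD e.1 0 + 1) else d.insert e.1 1
      if d.contains e.2 then d.insert e.2 (d.getD e.2 0 + 1) else d.insert e.2 1)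
      PySem.Dict.empty
  nodes.foldl (fun obj v => obj ++ [if degrees.contains v then degrees.getD v 0 else 0]) []

-- ===== PORT B =====
-- literal port of B: [sum((u == v) + (w == v) for (u, w) in edges) for v in nodes]
def compute_node_weights_alt (nodes : List Int) (edges : List (Int × Int)) : List Int :=
  nodes.map (fun v =>
    (edges.map (fun e => (if e.1 = v then (1 : Int) else 0) + (if e.2 = v then (1 : Int) else 0))).sum)

-- ===== PRECONDITION & SPEC =====
def Spec_compute_node_weights (nodes : List Int) (edges : List (Int × Int)) (out : List Int) : Prop := out = compute_node_weights_alt nodes edges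
instance (nodes : List Int) (edges : List (Int × Int)) (out : List Int) : Decidable (Spec_compute_node_weights nodes edges out) := by unfold Spec_compute_node_weights; infer_instance

-- ===== CLAIM (what is proved, stated in full; the proofs are below) =====
def Claim_equal_compute_node_weights : Prop := ∀ (nodes : List Int) (edges : List (Int × Int)), Dom_compute_node_weights nodes edges → Spec_compute_node_weights nodes edges (compute_node_weights nodes edges)

-- ===== LEMMAS AND PROOFS =====

-- the flattened endpoint list of the edges
def pvFlat (edges : List (Int × Int)) : List Int := edges.flatMap (fun e => [e.1, e.2])

-- A's two conditional updates per edge are exactly two counter-style inserts (when the key is absent, getD is 0)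
lemma pvStep (d : PySem.Dict Int Int) (x : Int) :
    (if d.contains x then d.insert x (d.getD x 0 + 1) else d.insert x 1)
      = d.insert x (d.getD x 0 + 1) := by
  by_cases h : d.contains x = true
  · simp [h]
  · have h' : d.contains x = false := by simpa using h
    rw [PySem.Dict.getD_of_not_contains d 0 h']
    simp [h']

lemma pvFold_eq (edges : List (Int × Int)) (d : PySem.Dict Int Int) :
    edges.foldl (fun d e =>
      let d := if d.contains e.1 then d.insert e.1 (d.getD e.1 0 + 1) else d.insert e.1 1
      if d.contains e.2 then d.insert e.2 (d.getD e.2 0 + 1) else d.insert e.2 1) d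
    = (pvFlat edges).foldl (fun d x => d.insert x (d.getD x 0 + 1)) d := by
  have hf : (fun (d : PySem.Dict Int Int) (e : Int × Int) =>
      let d := if d.contains e.1 then d.insert e.1 (d.getD e.1 0 + 1) else d.insert e.1 1
      if d.contains e.2 then d.insert e.2 (d.getD e.2 0 + 1) else d.insert e.2 1)
      = (fun (d : PySem.Dict Int Int) (e : Int × Int) =>
        (d.insert e.1 (d.getD e.1 0 + 1)).insert e.2
          ((d.insert e.1 (d.getD e.1 0 + 1)).getD e.2 0 + 1)) := by
    funext d e; simp only [pvStep]
  rw [hf]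
  induction edges generalizing d with
  | nil => rfl
  | cons e es ih =>
    simp only [List.foldl_cons, pvFlat, List.flatMap_cons, List.foldl_append,
      List.foldl_nil]
    exact ih _

-- B's per-node sum over edges is the count of the node in the flattened endpoint list
lemma pvSum_eq_count (edges : List (Int × Int)) (v : Int) :
    (edges.map (fun e => (if e.1 = v then (1 : Int) else 0) + (if e.2 = v then (1 : Int) else 0))).sum
      = ((pvFlat edges).count v : Int) := by
  induction edges with
  | nil => rfl
  | cons e es ih =>
    simp only [List.map_cons, List.sum_cons, pvFlat, List.flatMap_cons, List.count_append, ih]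
    by_cases h1 : e.1 = v <;> by_cases h2 : e.2 = v <;>
      simp [h1, h2]

theorem compute_node_weights_spec' (nodes : List Int) (edges : List (Int × Int)) :
    compute_node_weights nodes edges = compute_node_weights_alt nodes edges := by
  unfold compute_node_weights compute_node_weights_alt
  rw [pvFold_eq, PySem.List.foldl_append_singleton_eq_map]
  apply List.map_congr_left
  intro v _
  rw [pvSum_eq_count]
  have hkeys := PySem.Dict.keys_foldl_insert (pvFlat edges)
      (fun d x => d.getD x 0 + 1) (PySem.Dict.empty (κ := Int) (ν := Int))
  split_ifs with hc
  · rw [PySem.Dict.getD_foldl_insert_add_one]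
    simp [PySem.Dict.getD_empty]
  · have hc' : ((pvFlat edges).foldl
        (fun (d : PySem.Dict Int Int) x => d.insert x (d.getD x 0 + 1))
        PySem.Dict.empty).contains v = false := by simpa using hc
    -- v is not a key, hence not an endpoint, hence count 0
    have hmem : v ∉ pvFlat edges := by
      intro hv
      have hk : v ∈ ((pvFlat edges).foldl
          (fun (d : PySem.Dict Int Int) x => d.insert x (d.getD x 0 + 1))
          PySem.Dict.empty).keys := by
        rw [hkeys]
        exact (PySem.Set.mem_update _ _ _).mpr (Or.inr hv)
      rw [PySem.Dict.contains_eq_decide_mem_keys] at hc'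
      simp [hk] at hc'
    simp [List.count_eq_zero_of_not_mem hmem]

-- ===== VERDICT (by name: the statement is the Claim_ definition above) =====
theorem compute_node_weights_spec : Claim_equal_compute_node_weights := by
  intro nodes edges _
  exact compute_node_weights_spec' nodes edges
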